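-- pv_equiv track=rewrite | github.com/anderdnavarro/RFcaller | scripts/filterMPindels.py | correct_variants_list
-- ===== SOURCE A (Python) =====
-- def correct_variants_list(variants):
-- 	variants, indel_list = list(variants), []
-- 	while '+' in variants or '-' in variants or '^' in variants or '$' in variants: #To convert the indels in ; to count them only once
-- 		index_list = (j for j, k in enumerate(variants) if k == '+' or k == '-' or k == '^' or k == '$') #j is the index and k the element in variants, so if the element is + or -, it returns its index
-- 		n = next(index_list) #To focus on the first element
-- 		if variants[n] == '^': #^ represents the start of the read and the following character shows the mapQ of the read, thus we delete one of the symbols to take into account only once that mapQ value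
-- 			variants[n:n+2] = ''
-- 			continue
-- 		elif variants[n] == '$': #$ represents the end of a read segment, but the read mapQ value doesn't appear, so we have to remove the symbol
-- 			variants[n:n+1] = ''
-- 			continue
-- 		else: #indel
-- 			try:
-- 				size = int(str(variants[n+1])+str(variants[n+2]))+2 #In case the indel had more than 9 changes
-- 			except ValueError:
-- 				size = int(variants[n+1])+1 #The size of the indel, which is the element following the - or + symbol
-- 			indel_list.append(''.join(variants[n:n+size+1]))
-- 			variants[n-1:n+size+1] = ';' #To convert the indel pattern into a . (e.g. .+4ACGT > ;), thus there is only one symbol for each read. Note that before the indel pattern there is a . or , which is the symbol that has the mapQ value, so we also have to replace it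
-- 			continue
-- 	return(set(indel_list), indel_list, variants)
-- ===== SOURCE B (Python) =====
-- def correct_variants_list(variants):
--     s = list(variants)
--     out, indel_list = [], []
--     i, n = 0, len(s)
--     while i < n:
--         c = s[i]
--         if c == '^':          # start-of-read marker: skip it and the mapQ char after it
--             i += 2
--         elif c == '$':        # end-of-read marker: skip it
--             i += 1
--         elif c == '+' or c == '-':   # indel: parse its size, record it, collapse to ';'
--             try:
--                 size = int(s[i + 1] + s[i + 2]) + 2
--             except ValueError:
--                 size = int(s[i + 1]) + 1
--             indel_list.append(''.join(s[i:i + size + 1]))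
--             del out[-1]        # the preceding base carried the mapQ; the ';' replaces both
--             out.append(';')
--             i += size + 1
--         else:
--             out.append(c)
--             i += 1
--     return (set(indel_list), indel_list, out)
-- ===== Notes on version B (the rewrite author's own statement) =====
-- stated objective: alternative
-- what changed: A repeatedly rescans the list from the start for the first special symbol and splices the list in place; B makes one left-to-right pass over the string, building the output list and the indel list directly.
import Mathlib
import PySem

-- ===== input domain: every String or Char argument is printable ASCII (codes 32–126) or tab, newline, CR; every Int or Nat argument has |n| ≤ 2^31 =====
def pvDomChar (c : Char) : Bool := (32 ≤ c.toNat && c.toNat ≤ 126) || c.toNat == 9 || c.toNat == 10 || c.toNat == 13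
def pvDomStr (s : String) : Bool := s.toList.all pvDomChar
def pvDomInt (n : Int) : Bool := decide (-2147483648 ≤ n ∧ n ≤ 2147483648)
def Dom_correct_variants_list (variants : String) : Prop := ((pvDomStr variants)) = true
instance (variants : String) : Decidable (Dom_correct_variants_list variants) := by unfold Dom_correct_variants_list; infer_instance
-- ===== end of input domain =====

-- B replaces A's repeated scan-from-the-start + list splicing by ONE left-to-right pass;
-- equivalence is proved on Pre_, the inputs where the Python A returns normally.

-- ===== PORT A =====

def pvIsSpec (c : Char) : Bool := c == '+' || c == '-' || c == '^' || c == '$'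

-- Python contiguous-slice assignment v[a:b] = repl (negative / out-of-range bounds as Python)
def pvSliceAssign (v : List Char) (a b : Int) (repl : List Char) : List Char :=
  let a' := PySem.List.clampIdx v.length a
  let b' := PySem.List.clampIdx v.length b
  v.take a' ++ repl ++ v.drop (max a' b')

-- A's while-loop; fuel = initial length + 1 suffices on Pre_ (each iteration shortens the list).
-- Where Python raises (IndexError / uncaught ValueError, outside Pre_) the loop stops.
def pvLoopA : Nat → List Char → List String → List String × List Char
  | 0, v, ind => (ind, v)
  | fuel+1, v, ind =>
    if v.contains '+' || v.contains '-' || v.contains '^' || v.contains '$' then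
      -- n = next(j for j, k in enumerate(v) if k is one of + - ^ $); v[n] is in range
      if v.getD (v.findIdx pvIsSpec) ' ' == '^' then
        pvLoopA fuel (v.take (v.findIdx pvIsSpec) ++ v.drop (v.findIdx pvIsSpec + 2)) ind
      else if v.getD (v.findIdx pvIsSpec) ' ' == '$' then
        pvLoopA fuel (v.take (v.findIdx pvIsSpec) ++ v.drop (v.findIdx pvIsSpec + 1)) ind
      else
        match PySem.List.pyGet? v ((v.findIdx pvIsSpec : Int) + 1) with
        | none => (ind, v)                              -- IndexError (outside Pre_)
        | some a =>
          match PySem.List.pyGet? v ((v.findIdx pvIsSpec : Int) + 2) with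
          | none => (ind, v)                            -- IndexError (outside Pre_)
          | some b =>
            match (match PySem.Int.ofStr? (String.ofList [a, b]) with
                   | some m => some (m+2)
                   | none => (PySem.Int.ofStr? (String.ofList [a])).map (· + 1) : Option Int) with
            | none => (ind, v)                          -- uncaught ValueError (outside Pre_)
            | some size =>
              pvLoopA fuel
                (pvSliceAssign v ((v.findIdx pvIsSpec : Int) - 1) ((v.findIdx pvIsSpec : Int) + size + 1) [';'])
                (ind ++ [String.ofList (PySem.List.slice v (some (v.findIdx pvIsSpec : Int)) (some ((v.findIdx pvIsSpec : Int) + size + 1)))])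
    else (ind, v)

def correct_variants_list (variants : String) : List String × List String × List String :=
  let v := variants.toList
  let r := pvLoopA (v.length + 1) v []
  (PySem.Set.ofList r.1, r.1, r.2.map (fun c => String.ofList [c]))

-- ===== PORT B =====

-- B's single pass; fuel = length + 1 suffices on Pre_ (each step consumes ≥ 1 character).
-- Where Python B raises (IndexError on a truncated indel, outside Pre_) the pass stops; the
-- slice s[i:i+size+1] is ported as a take, exact for the non-negative sizes Pre_ admits.
def pvGoB : Nat → List Char → List Char → List String → List String × List Char
  | 0, _, out, ind => (ind, out)
  | fuel+1, s, out, ind =>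
    match s with
    | [] => (ind, out)
    | c :: r =>
      if c == '^' then pvGoB fuel (r.drop 1) out ind            -- i += 2
      else if c == '$' then pvGoB fuel r out ind                -- i += 1
      else if c == '+' || c == '-' then
        match r with
        | d1 :: d2 :: _ =>
          match (match PySem.Int.ofStr? (String.ofList [d1, d2]) with
                 | some m => some (m+2)
                 | none => (PySem.Int.ofStr? (String.ofList [d1])).map (· + 1) : Option Int) with
          | none => (ind, out)                                  -- ValueError (outside Pre_)
          | some size =>
            pvGoB fuel ((c :: r).drop (size+1).toNat)
              (out.dropLast ++ [';'])                           -- del out[-1]; out.append(';')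
              (ind ++ [String.ofList ((c :: r).take (size+1).toNat)])
        | _ => (ind, out)                                       -- IndexError (outside Pre_)
      else pvGoB fuel r (out ++ [c]) ind

def correct_variants_list_alt (variants : String) : List String × List String × List String :=
  let s := variants.toList
  let r := pvGoB (s.length + 1) s [] []
  (PySem.Set.ofList r.1, r.1, r.2.map (fun c => String.ofList [c]))

-- ===== PRECONDITION & SPEC =====

-- One-pass recognizer of the inputs on which A returns normally: prec = "some character
-- survives to the left" (an indel consumes the character before it), skip = characters still
-- inside the current token.  A sign needs ≥ 2 following characters and a parsable size
-- (A raises IndexError / ValueError otherwise); a sign with no surviving character before it,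
-- or a parsed two-character size < -2, makes A loop forever or return an accidental value of
-- Python's negative-slice wraparound, on which B's own pass never returns.
def pvWfAux : Bool → Nat → List Char → Bool
  | _, _, [] => true
  | prec, skip+1, _ :: r => pvWfAux prec skip r
  | prec, 0, c :: r =>
    if c == '^' then pvWfAux prec 1 r
    else if c == '$' then pvWfAux prec 0 r
    else if c == '+' || c == '-' then
      match r with
      | d1 :: d2 :: _ =>
        match PySem.Int.ofStr? (String.ofList [d1, d2]) with
        | some m => prec && decide (-2 ≤ m) && pvWfAux true (m+2).toNat r
        | none =>
          match PySem.Int.ofStr? (String.ofList [d1]) with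
          | some k => prec && decide (0 ≤ k) && pvWfAux true (k+1).toNat r
          | none => false
      | _ => false
    else pvWfAux true 0 r

-- Pre_ excludes exactly the inputs where A raises or never returns, plus the negative-size
-- indels on which A's value is an artefact of negative-slice wraparound and B diverges.
def Pre_correct_variants_list (variants : String) : Prop :=
  pvWfAux false 0 variants.toList = true

instance (variants : String) : Decidable (Pre_correct_variants_list variants) := by
  unfold Pre_correct_variants_list; infer_instance

def pvWitness_correct_variants_list : String := "..+2AC,^F."

def Spec_correct_variants_list (variants : String) (out : List String × List String × List String) : Prop := out = correct_variants_list_alt variants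
instance (variants : String) (out : List String × List String × List String) : Decidable (Spec_correct_variants_list variants out) := by unfold Spec_correct_variants_list; infer_instance

-- ===== CLAIM (what is proved, stated in full; the proofs are below) =====
def Claim_equal_correct_variants_list : Prop := ∀ (variants : String), Dom_correct_variants_list variants → Pre_correct_variants_list variants → Spec_correct_variants_list variants (correct_variants_list variants)

-- ===== LEMMAS AND PROOFS =====

theorem pv_wfAux_skip (prec : Bool) : ∀ (s : List Char) (k : Nat),
    pvWfAux prec k s = pvWfAux prec 0 (s.drop k) := by
  intro s
  induction s with
  | nil => intro k; cases k <;> simp [pvWfAux]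
  | cons c r ih =>
    intro k
    cases k with
    | zero => rfl
    | succ j => simpa [pvWfAux] using ih j

theorem pv_contains_any (v : List Char) :
    (v.contains '+' || v.contains '-' || v.contains '^' || v.contains '$') = v.any pvIsSpec := by
  rw [Bool.eq_iff_iff]
  simp only [Bool.or_eq_true, List.contains_eq_mem, decide_eq_true_eq, List.any_eq_true,
    pvIsSpec, beq_iff_eq]
  constructor
  · rintro (((h | h) | h) | h)
    exacts [⟨'+', h, by simp⟩, ⟨'-', h, by simp⟩, ⟨'^', h, by simp⟩, ⟨'$', h, by simp⟩]
  · rintro ⟨x, hx, (((rfl | rfl) | rfl) | rfl)⟩ <;> tauto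

theorem pv_findIdx_append (P : List Char) (c : Char) (r : List Char)
    (hP : ∀ x ∈ P, pvIsSpec x = false) (hc : pvIsSpec c = true) :
    (P ++ c :: r).findIdx pvIsSpec = P.length := by
  induction P with
  | nil => simp [List.findIdx_cons, hc]
  | cons p P ih =>
    have hp := hP p (by simp)
    simp [List.findIdx_cons, hp, ih (fun x hx => hP x (by simp [hx]))]

theorem pv_getD_append (P : List Char) (c : Char) (r : List Char) :
    (P ++ c :: r).getD P.length ' ' = c := by
  have h : (P ++ c :: r)[P.length]? = some c := by
    rw [List.getElem?_append_right (Nat.le_refl _)]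
    simp
  rw [List.getD, h]
  rfl

theorem pv_slice_assign (P S : List Char) (hP : P ≠ []) (size : Int) (hs : 0 ≤ size) :
    pvSliceAssign (P ++ S) ((P.length : Int) - 1) ((P.length : Int) + size + 1) [';']
      = (P.dropLast ++ [';']) ++ S.drop (size+1).toNat := by
  have hlen : 1 ≤ P.length := List.length_pos_iff.2 hP
  have ha : PySem.List.clampIdx (P ++ S).length ((P.length : Int) - 1) = P.length - 1 := by
    rw [show ((P.length : Int) - 1) = ((P.length - 1 : Nat) : Int) by omega,
      PySem.List.clampIdx_natCast]
    simp [List.length_append]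
    omega
  have hb : PySem.List.clampIdx (P ++ S).length ((P.length : Int) + size + 1)
      = min (P.length + (size+1).toNat) (P ++ S).length := by
    rw [show ((P.length : Int) + size + 1) = ((P.length + (size+1).toNat : Nat) : Int) by omega,
      PySem.List.clampIdx_natCast]
  have htake : (P ++ S).take (P.length - 1) = P.dropLast := by
    rw [List.take_append, List.dropLast_eq_take]
    have h0 : P.length - 1 - P.length = 0 := by omega
    simp [h0]
  have hdrop : (P ++ S).drop (max (P.length - 1) (min (P.length + (size+1).toNat) (P ++ S).length))
      = S.drop ((size+1).toNat) := by
    by_cases h : P.length + (size+1).toNat ≤ (P ++ S).length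
    · have hmax : max (P.length - 1) (min (P.length + (size+1).toNat) (P ++ S).length)
          = P.length + (size+1).toNat := by
        simp only [List.length_append] at h ⊢
        omega
      rw [hmax, List.drop_append, List.drop_eq_nil_of_le (by omega)]
      simp
    · have hmax : max (P.length - 1) (min (P.length + (size+1).toNat) (P ++ S).length)
          = (P ++ S).length := by
        simp only [List.length_append] at h ⊢
        omega
      rw [hmax, List.drop_eq_nil_of_le (Nat.le_refl _),
        List.drop_eq_nil_of_le (by simp only [List.length_append] at h; omega)]
  show (P ++ S).take (PySem.List.clampIdx (P ++ S).length ((P.length : Int) - 1)) ++ [';']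
      ++ (P ++ S).drop (max (PySem.List.clampIdx (P ++ S).length ((P.length : Int) - 1))
        (PySem.List.clampIdx (P ++ S).length ((P.length : Int) + size + 1)))
    = (P.dropLast ++ [';']) ++ S.drop (size+1).toNat
  rw [ha, hb, htake, hdrop]

theorem pv_main : ∀ (fB : Nat) (S P : List Char) (ind : List String) (fA : Nat),
    (∀ x ∈ P, pvIsSpec x = false) →
    pvWfAux (!P.isEmpty) 0 S = true →
    P.length + S.length + 1 ≤ fA →
    S.length + 1 ≤ fB →
    pvLoopA fA (P ++ S) ind = pvGoB fB S P ind := by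
  intro fB
  induction fB with
  | zero => intro S P ind fA _ _ _ h; omega
  | succ fB ih =>
    intro S P ind fA hP hwf hfA hfB
    cases S with
    | nil =>
      obtain ⟨fA', rfl⟩ : ∃ fA', fA = fA' + 1 := ⟨fA - 1, by omega⟩
      simp only [List.append_nil]
      have hcond : (P.contains '+' || P.contains '-' || P.contains '^' || P.contains '$') = false := by
        rw [pv_contains_any]
        simp only [List.any_eq_false]
        intro x hx
        simp [hP x hx]
      simp only [pvLoopA, pvGoB, hcond, Bool.false_eq_true, if_false]
    | cons c r =>
      by_cases hc : pvIsSpec c = true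
      · -- c is one of + - ^ $
        obtain ⟨fA', rfl⟩ : ∃ fA', fA = fA' + 1 := ⟨fA - 1, by simp at hfA; omega⟩
        have hcond : ((P ++ c :: r).contains '+' || (P ++ c :: r).contains '-'
            || (P ++ c :: r).contains '^' || (P ++ c :: r).contains '$') = true := by
          rw [pv_contains_any]
          exact List.any_eq_true.2 ⟨c, by simp, hc⟩
        have hn := pv_findIdx_append P c r hP hc
        have hget : (P ++ c :: r).getD ((P ++ c :: r).findIdx pvIsSpec) ' ' = c := by
          rw [hn]; exact pv_getD_append P c r
        by_cases h1 : c = '^'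
        · subst h1
          have htakeA : (P ++ '^' :: r).take ((P ++ '^' :: r).findIdx pvIsSpec) = P := by
            rw [hn]; exact List.take_left
          have hdropA : (P ++ '^' :: r).drop ((P ++ '^' :: r).findIdx pvIsSpec + 2) = r.drop 1 := by
            rw [hn, List.drop_append, List.drop_eq_nil_of_le (show P.length ≤ P.length + 2 by omega)]
            have h2 : P.length + 2 - P.length = 2 := by omega
            simp [h2]
          have hstep : pvLoopA (fA' + 1) (P ++ '^' :: r) ind = pvLoopA fA' (P ++ r.drop 1) ind := by
            simp only [pvLoopA, hcond, if_true, hget, beq_self_eq_true, htakeA, hdropA]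
          have hgo : pvGoB (fB + 1) ('^' :: r) P ind = pvGoB fB (r.drop 1) P ind := by
            simp [pvGoB]
          rw [hstep, hgo]
          have hwf' : pvWfAux (!P.isEmpty) 0 (r.drop 1) = true := by
            have h := hwf
            simp only [pvWfAux, beq_self_eq_true, if_true] at h
            rwa [pv_wfAux_skip] at h
          refine ih (r.drop 1) P ind fA' hP hwf' ?_ ?_
          · simp only [List.length_cons] at hfA
            simp only [List.length_drop]
            omega
          · simp only [List.length_cons] at hfB
            simp only [List.length_drop]
            omega
        · by_cases h2 : c = '$'
          · subst h2
            have h1' : (('$' : Char) == '^') = false := by decide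
            have htakeA : (P ++ '$' :: r).take ((P ++ '$' :: r).findIdx pvIsSpec) = P := by
              rw [hn]; exact List.take_left
            have hdropA : (P ++ '$' :: r).drop ((P ++ '$' :: r).findIdx pvIsSpec + 1) = r := by
              rw [hn, List.drop_append, List.drop_eq_nil_of_le (show P.length ≤ P.length + 1 by omega)]
              have h3 : P.length + 1 - P.length = 1 := by omega
              simp [h3]
            have hstep : pvLoopA (fA' + 1) (P ++ '$' :: r) ind = pvLoopA fA' (P ++ r) ind := by
              simp only [pvLoopA, hcond, if_true, hget, h1', Bool.false_eq_true, if_false,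
                beq_self_eq_true, htakeA, hdropA]
            have hgo : pvGoB (fB + 1) ('$' :: r) P ind = pvGoB fB r P ind := by
              simp [pvGoB]
            rw [hstep, hgo]
            have hwf' : pvWfAux (!P.isEmpty) 0 r = true := by
              simpa only [pvWfAux, h1', Bool.false_eq_true, if_false, beq_self_eq_true, if_true] using hwf
            refine ih r P ind fA' hP hwf' ?_ ?_
            · simp only [List.length_cons] at hfA; omega
            · simp only [List.length_cons] at hfB; omega
          · -- indel: c is '+' or '-'
            have h1' : (c == '^') = false := by simp [h1]
            have h2' : (c == '$') = false := by simp [h2]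
            have hpm : (c == '+' || c == '-') = true := by
              simp only [pvIsSpec, h1', h2', Bool.or_false] at hc
              exact hc
            cases r with
            | nil => simp [pvWfAux, h1', h2', hpm] at hwf
            | cons d1 r1 =>
              cases r1 with
              | nil => simp [pvWfAux, h1', h2', hpm] at hwf
              | cons d2 r2 =>
                have hga : PySem.List.pyGet? (P ++ c :: d1 :: d2 :: r2) ((P.length : Int) + 1) = some d1 := by
                  have h := PySem.List.pyGet?_append_length (P ++ [c]) (d2 :: r2) d1
                  rw [show ((P ++ [c]) ++ d1 :: d2 :: r2) = P ++ c :: d1 :: d2 :: r2 by simp] at h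
                  rw [show (((P ++ [c]).length : Nat) : Int) = (P.length : Int) + 1 by
                    simp [List.length_append]] at h
                  exact h
                have hgb : PySem.List.pyGet? (P ++ c :: d1 :: d2 :: r2) ((P.length : Int) + 2) = some d2 := by
                  have h := PySem.List.pyGet?_append_length (P ++ [c, d1]) r2 d2
                  rw [show ((P ++ [c, d1]) ++ d2 :: r2) = P ++ c :: d1 :: d2 :: r2 by simp] at h
                  rw [show (((P ++ [c, d1]).length : Nat) : Int) = (P.length : Int) + 2 by
                    simp [List.length_append]] at h
                  exact h
                have hA : ((P ++ c :: d1 :: d2 :: r2).getD P.length ' ' == '^') = false := by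
                  rw [pv_getD_append]; exact h1'
                have hB : ((P ++ c :: d1 :: d2 :: r2).getD P.length ' ' == '$') = false := by
                  rw [pv_getD_append]; exact h2'
                have hwfu := hwf
                simp only [pvWfAux, h1', h2', hpm, Bool.false_eq_true, if_false, if_true] at hwfu
                -- generic continuation, used by both parse branches
                have hcont : ∀ (size : Int), 0 ≤ size → P ≠ [] →
                    pvWfAux true 0 ((c :: d1 :: d2 :: r2).drop ((size + 1).toNat)) = true →
                    pvLoopA fA' ((P.dropLast ++ [';']) ++ (c :: d1 :: d2 :: r2).drop ((size + 1).toNat))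
                        (ind ++ [String.ofList ((c :: d1 :: d2 :: r2).take ((size + 1).toNat))])
                      = pvGoB fB ((c :: d1 :: d2 :: r2).drop ((size + 1).toNat)) (P.dropLast ++ [';'])
                        (ind ++ [String.ofList ((c :: d1 :: d2 :: r2).take ((size + 1).toNat))]) := by
                  intro size hs0 hPne hwfc
                  have hp1 : 1 ≤ P.length := List.length_pos_iff.2 hPne
                  have ht1 : 1 ≤ (size + 1).toNat := by omega
                  refine ih _ (P.dropLast ++ [';']) _ fA' ?_ ?_ ?_ ?_
                  · intro x hx
                    rcases List.mem_append.1 hx with hx | hx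
                    · exact hP x (List.dropLast_subset P hx)
                    · simp only [List.mem_singleton] at hx
                      subst hx
                      decide
                  · have he : (!(P.dropLast ++ [';']).isEmpty) = true := by simp
                    rw [he]
                    exact hwfc
                  · have hl1 : (P.dropLast ++ [';']).length = P.length - 1 + 1 := by simp
                    rw [hl1, List.length_drop]
                    simp only [List.length_cons] at hfA ⊢
                    omega
                  · rw [List.length_drop]
                    simp only [List.length_cons] at hfB ⊢
                    omega
                rcases htwo : PySem.Int.ofStr? (String.ofList [d1, d2]) with _ | m
                · rcases hone : PySem.Int.ofStr? (String.ofList [d1]) with _ | k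
                  · simp [htwo, hone] at hwfu
                  · -- one-digit size: size = k + 1
                    rw [htwo, hone] at hwfu
                    simp only [Bool.and_eq_true, decide_eq_true_eq] at hwfu
                    obtain ⟨⟨hprec, hk0⟩, hwf2⟩ := hwfu
                    have hPne : P ≠ [] := by
                      intro h
                      rw [h] at hprec
                      simp at hprec
                    have hs0 : (0 : Int) ≤ k + 1 := by omega
                    have hslice : PySem.List.slice (P ++ c :: d1 :: d2 :: r2)
                        (some (P.length : Int)) (some ((P.length : Int) + (k + 1) + 1))
                        = (c :: d1 :: d2 :: r2).take ((k + 1 + 1).toNat) := by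
                      rw [PySem.List.slice_toNat _ (by exact_mod_cast Nat.zero_le _) (by omega)]
                      rw [show ((P.length : Int)).toNat = P.length by simp, List.drop_left]
                      congr 1
                      omega
                    have hstep : pvLoopA (fA' + 1) (P ++ c :: d1 :: d2 :: r2) ind
                        = pvLoopA fA' ((P.dropLast ++ [';']) ++ (c :: d1 :: d2 :: r2).drop ((k + 1 + 1).toNat))
                          (ind ++ [String.ofList ((c :: d1 :: d2 :: r2).take ((k + 1 + 1).toNat))]) := by
                      simp only [pvLoopA, hcond, if_true, hn, hA, hB, Bool.false_eq_true,
                        if_false, hga, hgb, htwo, hone, Option.map_some]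
                      rw [pv_slice_assign P (c :: d1 :: d2 :: r2) hPne (k + 1) hs0, hslice]
                    have hgo : pvGoB (fB + 1) (c :: d1 :: d2 :: r2) P ind
                        = pvGoB fB ((c :: d1 :: d2 :: r2).drop ((k + 1 + 1).toNat)) (P.dropLast ++ [';'])
                          (ind ++ [String.ofList ((c :: d1 :: d2 :: r2).take ((k + 1 + 1).toNat))]) := by
                      simp only [pvGoB, h1', h2', Bool.false_eq_true, if_false, hpm, if_true,
                        htwo, hone, Option.map_some]
                    rw [hstep, hgo]
                    refine hcont (k + 1) hs0 hPne ?_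
                    rw [pv_wfAux_skip] at hwf2
                    rw [show (k + 1 + 1).toNat = (k + 1).toNat + 1 by omega, List.drop_succ_cons]
                    exact hwf2
                · -- two-digit size: size = m + 2
                  rw [htwo] at hwfu
                  simp only [Bool.and_eq_true, decide_eq_true_eq] at hwfu
                  obtain ⟨⟨hprec, hm2⟩, hwf2⟩ := hwfu
                  have hPne : P ≠ [] := by
                    intro h
                    rw [h] at hprec
                    simp at hprec
                  have hs0 : (0 : Int) ≤ m + 2 := by omega
                  have hslice : PySem.List.slice (P ++ c :: d1 :: d2 :: r2)
                      (some (P.length : Int)) (some ((P.length : Int) + (m + 2) + 1))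
                      = (c :: d1 :: d2 :: r2).take ((m + 2 + 1).toNat) := by
                    rw [PySem.List.slice_toNat _ (by exact_mod_cast Nat.zero_le _) (by omega)]
                    rw [show ((P.length : Int)).toNat = P.length by simp, List.drop_left]
                    congr 1
                    omega
                  have hstep : pvLoopA (fA' + 1) (P ++ c :: d1 :: d2 :: r2) ind
                      = pvLoopA fA' ((P.dropLast ++ [';']) ++ (c :: d1 :: d2 :: r2).drop ((m + 2 + 1).toNat))
                        (ind ++ [String.ofList ((c :: d1 :: d2 :: r2).take ((m + 2 + 1).toNat))]) := by
                    simp only [pvLoopA, hcond, if_true, hn, hA, hB, Bool.false_eq_true,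
                      if_false, hga, hgb, htwo]
                    rw [pv_slice_assign P (c :: d1 :: d2 :: r2) hPne (m + 2) hs0, hslice]
                  have hgo : pvGoB (fB + 1) (c :: d1 :: d2 :: r2) P ind
                      = pvGoB fB ((c :: d1 :: d2 :: r2).drop ((m + 2 + 1).toNat)) (P.dropLast ++ [';'])
                        (ind ++ [String.ofList ((c :: d1 :: d2 :: r2).take ((m + 2 + 1).toNat))]) := by
                    simp only [pvGoB, h1', h2', Bool.false_eq_true, if_false, hpm, if_true, htwo]
                  rw [hstep, hgo]
                  refine hcont (m + 2) hs0 hPne ?_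
                  rw [pv_wfAux_skip] at hwf2
                  rw [show (m + 2 + 1).toNat = (m + 2).toNat + 1 by omega, List.drop_succ_cons]
                  exact hwf2
      · -- ordinary character
        have hc' : ((¬c = '+' ∧ ¬c = '-') ∧ ¬c = '^') ∧ ¬c = '$' := by
          simpa [pvIsSpec, not_or] using hc
        obtain ⟨⟨⟨h1, h2⟩, h3⟩, h4⟩ := hc'
        have hgo : pvGoB (fB + 1) (c :: r) P ind = pvGoB fB r (P ++ [c]) ind := by
          simp [pvGoB, h1, h2, h3, h4]
        have hwf' : pvWfAux true 0 r = true := by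
          simpa [pvWfAux, h1, h2, h3, h4] using hwf
        rw [hgo, show P ++ c :: r = (P ++ [c]) ++ r from by simp]
        refine ih r (P ++ [c]) ind fA ?_ ?_ ?_ ?_
        · intro x hx
          rcases List.mem_append.1 hx with hx | hx
          · exact hP x hx
          · simp only [List.mem_singleton] at hx
            subst hx
            simp [pvIsSpec, h1, h2, h3, h4]
        · have he : (!(P ++ [c]).isEmpty) = true := by simp
          rw [he]
          exact hwf'
        · simp only [List.length_append, List.length_cons, List.length_nil] at hfA ⊢
          omega
        · simp only [List.length_cons] at hfB
          omega

-- ===== VERDICT (by name: the statement is the Claim_ definition above) =====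
theorem correct_variants_list_spec : Claim_equal_correct_variants_list := by
  intro variants _ hpre
  unfold Spec_correct_variants_list correct_variants_list correct_variants_list_alt
  have h := pv_main (variants.toList.length + 1) variants.toList [] [] (variants.toList.length + 1)
    (by intro x hx; cases hx) (by simpa [List.isEmpty] using hpre) (by simp) (by omega)
  simp only [List.nil_append] at h
  simp only [h]
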